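-- pv_equiv track=rewrite | github.com/aikakyrgyz/Makers | fish.py | solution
-- ===== SOURCE A (Python) =====
-- def solution(A, B):
--     # write your code in Python 3.6
--
--     size = []
--     stream = []
--
--     for i in range(len(A)):
--         if len(stream)!=0 and stream[len(stream)-1]== 1 and B[i] == 0:
--             if size[len(size)-1] > A[i]:
--                 pass
--             else:
--                 while len(stream)!= 0:
--                     if stream[len(stream)-1] == 0:
--                         size.append(A[i])
--                         stream.append(B[i])
--                         break
--                     if size[len(size)-1] > A[i]:
--                         break
--                     else:
--                         size.pop()
--                         stream.pop()
--                 if len(stream) == 0: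
--                     stream.append(B[i])
--                     size.append(A[i])
--
--         else:
--             size.append(A[i])
--             stream.append(B[i])
--
--     return len(size)
-- ===== SOURCE B (Python) =====
-- def solution(A, B):
--     # Persistent-node formulation: fish are appended to immutable arrays and never
--     # removed; each node stores a previous-greater jump link (pg) and its depth in
--     # the alive chain.  A fight walks pg links instead of popping; fish at or below
--     # the topmost flow-0 fish are untouchable and only counted (frozen).
--     frozen = 0
--     top = -1                      # node index of the alive-chain top, -1 = none
--     size, flow, depth, pg = [], [], [], []
--
--     def jump(cur, a):             # first node at/below cur with size > a, else -1
--         while cur >= 0 and size[cur] <= a: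
--             cur = pg[cur]
--         return cur
--
--     for a, b in zip(A, B):
--         if b == 0:
--             if top < 0:
--                 frozen += 1                        # lands on a flow-0 top / empty
--             elif flow[top] != 1:
--                 frozen += depth[top] + 1           # no fight: freezes the chain
--                 top = -1
--             else:
--                 top = jump(top, a)                 # fight by pointer jumping
--                 if top < 0:
--                     frozen += 1                    # chain exhausted: it settles
--         else:
--             size.append(a)
--             flow.append(b)
--             depth.append(depth[top] + 1 if top >= 0 else 1)
--             pg.append(jump(top, a))
--             top = len(size) - 1
--     return frozen + (depth[top] if top >= 0 else 0)
-- ===== Notes on version B (the rewrite author's own statement) =====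
-- stated objective: alternative
-- what changed: Replaces A's two parallel pop-based stacks and nested break-driven while loop with persistent node arrays that are never popped: each fish node stores a previous-greater jump link and its alive-chain depth, fights are resolved by jumping along those links (moving a single top pointer), and settled fish are only counted in a frozen counter.
import Mathlib
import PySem

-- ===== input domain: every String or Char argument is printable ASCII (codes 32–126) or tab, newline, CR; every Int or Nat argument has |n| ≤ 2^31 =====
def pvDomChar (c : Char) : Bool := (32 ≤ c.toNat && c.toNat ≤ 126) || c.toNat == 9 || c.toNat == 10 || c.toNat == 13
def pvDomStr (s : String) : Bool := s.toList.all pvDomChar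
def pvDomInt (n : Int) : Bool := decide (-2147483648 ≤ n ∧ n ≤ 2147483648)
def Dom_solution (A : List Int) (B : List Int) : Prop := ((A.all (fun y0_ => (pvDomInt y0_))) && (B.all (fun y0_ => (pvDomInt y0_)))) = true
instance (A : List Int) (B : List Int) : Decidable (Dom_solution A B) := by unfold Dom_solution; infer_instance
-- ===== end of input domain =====

-- B replaces A's two pop-based stacks with append-only node arrays: fights follow
-- previous-greater jump links moving a top pointer, survivors below are only counted.

-- ===== PORT A =====
-- Python keeps two lists `size` and `stream` always pushed/popped together; the port
-- keeps the same stack as a list of (size, stream) pairs, head = top of the stack.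
-- Inner `while len(stream) != 0:` loop, step for step (same branch order).
def solutionLoop (a b : Int) : List (Int × Int) → List (Int × Int)
  | [] => []
  | (sz, st) :: rest =>
    if st == 0 then (a, b) :: (sz, st) :: rest          -- append A[i], B[i]; break
    else if sz > a then (sz, st) :: rest                -- break
    else solutionLoop a b rest                          -- size.pop(); stream.pop()

-- one iteration of the `for i in range(len(A))` body; ab = (A[i], B[i])
def solutionStep (stk : List (Int × Int)) (ab : Int × Int) : List (Int × Int) :=
  match stk with
  | (sz, st) :: rest =>
    if st == 1 && ab.2 == 0 then
      if sz > ab.1 then (sz, st) :: rest                -- pass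
      else
        match solutionLoop ab.1 ab.2 ((sz, st) :: rest) with
        | [] => [(ab.1, ab.2)]                          -- if len(stream) == 0: append
        | q :: qs => q :: qs
    else (ab.1, ab.2) :: (sz, st) :: rest               -- else: append
  | [] => [(ab.1, ab.2)]                                -- len(stream) == 0 → else: append

def solution (A : List Int) (B : List Int) : Int :=
  -- A[i], B[i]: in range for every i the loop reaches under Pre_solution (default never used there)
  (((PySem.List.pyRange 0 (A.length : Int) 1).foldl
      (fun stk i => solutionStep stk (PySem.List.pyGetD A i 0, PySem.List.pyGetD B i 0)) []).length : Int)

-- ===== PORT B =====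
-- node of Source B's parallel arrays size/flow/depth/pg (never removed once appended)
structure PvNode where
  sz : Int
  fl : Int
  dp : Int
  pg : Int
deriving DecidableEq, Repr

-- size[cur] etc.; cur is guarded non-negative before use, default never read there
def pvGetN (nds : List PvNode) (cur : Int) : PvNode := nds.getD cur.toNat ⟨0, 0, 0, -1⟩

-- `def jump(cur, a): while cur >= 0 and size[cur] <= a: cur = pg[cur]`; fuel bounds
-- the loop (pg links strictly descend, so nds.length + 1 steps always suffice)
def pvJump (nds : List PvNode) (a : Int) : Nat → Int → Int
  | 0, cur => cur
  | f + 1, cur =>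
    if cur < 0 then cur
    else if (pvGetN nds cur).sz ≤ a then pvJump nds a f (pvGetN nds cur).pg
    else cur

-- loop body of Source B; state = (frozen, top, nodes)
def altStep (st : Int × Int × List PvNode) (ab : Int × Int) : Int × Int × List PvNode :=
  let frozen := st.1
  let top := st.2.1
  let nds := st.2.2
  if ab.2 == 0 then
    if top < 0 then (frozen + 1, top, nds)
    else if (pvGetN nds top).fl != 1 then (frozen + (pvGetN nds top).dp + 1, -1, nds)
    else
      let t := pvJump nds ab.1 (nds.length + 1) top
      ((if t < 0 then frozen + 1 else frozen), t, nds)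
  else
    let p := pvJump nds ab.1 (nds.length + 1) top
    let dp := if top ≥ 0 then (pvGetN nds top).dp + 1 else 1
    (frozen, (nds.length : Int), nds ++ [⟨ab.1, ab.2, dp, p⟩])

def solution_alt (A : List Int) (B : List Int) : Int :=
  let r := (A.zip B).foldl altStep (0, -1, [])
  r.1 + (if r.2.1 ≥ 0 then (pvGetN r.2.2 r.2.1).dp else 0)

-- ===== PRECONDITION & SPEC =====
-- Pre_ excludes only the inputs on which A raises: when len(B) < len(A) the access B[i] hits an
-- IndexError; A returns normally everywhere else.
def Pre_solution (A : List Int) (B : List Int) : Prop := A.length ≤ B.length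
instance (A : List Int) (B : List Int) : Decidable (Pre_solution A B) := by
  unfold Pre_solution; infer_instance
def pvWitness_solution : List Int × List Int := ([3, 2, 4], [1, 0, 1])

def Spec_solution (A : List Int) (B : List Int) (out : Int) : Prop := out = solution_alt A B
instance (A : List Int) (B : List Int) (out : Int) : Decidable (Spec_solution A B out) := by unfold Spec_solution; infer_instance

-- ===== CLAIM (what is proved, stated in full; the proofs are below) =====
def Claim_equal_solution : Prop := ∀ (A : List Int) (B : List Int), Dom_solution A B → Pre_solution A B → Spec_solution A B (solution A B)

-- ===== LEMMAS AND PROOFS =====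

-- A's index loop over range(len(A)) is the fold of the step over A.zip B (indices in range).
theorem foldl_range_getD_zip {σ : Type} (g : σ → Int × Int → σ) :
    ∀ (A B : List Int) (init : σ), A.length ≤ B.length →
      (List.range A.length).foldl (fun s k => g s (A.getD k 0, B.getD k 0)) init
        = (A.zip B).foldl g init := by
  intro A
  induction A with
  | nil => intro B init _; simp
  | cons a A' ih =>
    intro B init h
    cases B with
    | nil => simp at h
    | cons b B' =>
      simp only [List.length_cons, List.range_succ_eq_map, List.foldl_cons, List.foldl_map,
        List.getD_cons_zero, List.getD_cons_succ, List.zip_cons_cons]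
      exact ih B' (g init (a, b)) (by simpa using h)

theorem solution_eq_zip (A B : List Int) (h : A.length ≤ B.length) :
    solution A B
      = (((A.zip B).foldl (fun stk ab => solutionStep stk ab) []).length : Int) := by
  unfold solution
  rw [PySem.List.pyRange_one]
  simp only [sub_zero, Int.toNat_natCast, List.foldl_map, zero_add, PySem.List.pyGetD_natCast]
  rw [foldl_range_getD_zip (fun stk ab => solutionStep stk ab) A B [] h]

-- first index at/below the chain head whose size exceeds a (what Source B's jump computes)
def fgIdx (nds : List PvNode) (a : Int) : List Nat → Int
  | [] => -1
  | c :: cs => if a < (pvGetN nds (c : Int)).sz then (c : Int) else fgIdx nds a cs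

-- the alive chain (top first): in-bounds, strictly descending indices, no flow-0 node,
-- each node's pg = first greater below it, each node's dp = its chain depth
def ChainOK (nds : List PvNode) : List Nat → Prop
  | [] => True
  | c :: cs => c < nds.length ∧ (∀ c' ∈ cs, c' < c) ∧ (pvGetN nds (c : Int)).fl ≠ 0 ∧
      (pvGetN nds (c : Int)).pg = fgIdx nds (pvGetN nds (c : Int)).sz cs ∧
      (pvGetN nds (c : Int)).dp = (cs.length : Int) + 1 ∧ ChainOK nds cs

def cIdx : List Nat → Int
  | [] => -1
  | c :: _ => (c : Int)

def nodesOf (nds : List PvNode) (ch : List Nat) : List (Int × Int) :=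
  ch.map (fun (i : Nat) => ((pvGetN nds (i : Int)).sz, (pvGetN nds (i : Int)).fl))

-- A's stack = chain nodes on top of a frozen block whose top entry, if any, is flow 0
def SInv (stk : List (Int × Int)) (st : Int × Int × List PvNode) : Prop :=
  ∃ ch zs, stk = nodesOf st.2.2 ch ++ zs ∧ ChainOK st.2.2 ch ∧ st.2.1 = cIdx ch ∧
    ((zs.length : Int) = st.1) ∧ (zs = [] ∨ ∃ z zt, zs = z :: zt ∧ z.2 = 0)

theorem chainOK_bound (nds : List PvNode) :
    ∀ ch, ChainOK nds ch → ∀ c ∈ ch, c < nds.length := by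
  intro ch
  induction ch with
  | nil => intro _ c hc; simp at hc
  | cons c cs ih =>
    intro h c' hc'
    rcases List.mem_cons.mp hc' with h1 | h1
    · subst h1; exact h.1
    · exact ih h.2.2.2.2.2 c' h1

theorem chainOK_fl (nds : List PvNode) :
    ∀ ch, ChainOK nds ch → ∀ c ∈ ch, (pvGetN nds (c : Int)).fl ≠ 0 := by
  intro ch
  induction ch with
  | nil => intro _ c hc; simp at hc
  | cons c cs ih =>
    intro h c' hc'
    rcases List.mem_cons.mp hc' with h1 | h1
    · subst h1; exact h.2.2.1
    · exact ih h.2.2.2.2.2 c' h1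

theorem chainOK_len (nds : List PvNode) :
    ∀ cs c, ChainOK nds (c :: cs) → cs.length ≤ c := by
  intro cs
  induction cs with
  | nil => intro c _; simp
  | cons c1 cs1 ih =>
    intro c h
    have hlt : c1 < c := h.2.1 c1 (by simp)
    have := ih c1 h.2.2.2.2.2
    simp only [List.length_cons]
    omega

-- node lookups, fgIdx and ChainOK are unchanged by appending a node at the end
theorem pvGetN_append (nds : List PvNode) (x : PvNode) (c : Nat) (h : c < nds.length) :
    pvGetN (nds ++ [x]) (c : Int) = pvGetN nds (c : Int) := by
  simp [pvGetN, List.getD, List.getElem?_append_left h]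

theorem pvGetN_append_last (nds : List PvNode) (x : PvNode) :
    pvGetN (nds ++ [x]) ((nds.length : Nat) : Int) = x := by
  simp [pvGetN, List.getD]

theorem fgIdx_append (nds : List PvNode) (x : PvNode) (a : Int) :
    ∀ ch, (∀ c ∈ ch, c < nds.length) → fgIdx (nds ++ [x]) a ch = fgIdx nds a ch := by
  intro ch
  induction ch with
  | nil => intro _; rfl
  | cons c cs ih =>
    intro hb
    have hc : c < nds.length := hb c (by simp)
    simp only [fgIdx, pvGetN_append nds x c hc]
    rw [ih (fun c' hc' => hb c' (by simp [hc']))]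

theorem chainOK_append (nds : List PvNode) (x : PvNode) :
    ∀ ch, ChainOK nds ch → ChainOK (nds ++ [x]) ch := by
  intro ch
  induction ch with
  | nil => intro _; trivial
  | cons c cs ih =>
    intro h
    obtain ⟨h1, h2, h3, h4, h5, h6⟩ := h
    have hb := chainOK_bound nds cs h6
    refine ⟨by simp only [List.length_append, List.length_cons]; omega, h2, ?_, ?_, ?_, ih h6⟩
    · rw [pvGetN_append nds x c h1]; exact h3
    · rw [pvGetN_append nds x c h1, fgIdx_append nds x _ cs hb]; exact h4
    · rw [pvGetN_append nds x c h1]; exact h5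

theorem nodesOf_append (nds : List PvNode) (x : PvNode) :
    ∀ ch, (∀ c ∈ ch, c < nds.length) → nodesOf (nds ++ [x]) ch = nodesOf nds ch := by
  intro ch
  induction ch with
  | nil => intro _; rfl
  | cons c cs ih =>
    intro hb
    simp only [nodesOf, List.map_cons] at *
    rw [pvGetN_append nds x c (hb c (by simp)), ih (fun c' hc' => hb c' (by simp [hc']))]

-- fgIdx splits the chain: a skipped prefix of sizes ≤ a, then the stop suffix
theorem fgIdx_split (nds : List PvNode) (a : Int) :
    ∀ ch, ChainOK nds ch →
      ∃ pre suf, ch = pre ++ suf ∧ (∀ c ∈ pre, (pvGetN nds (c : Int)).sz ≤ a) ∧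
        fgIdx nds a ch = cIdx suf ∧ ChainOK nds suf ∧
        (suf = [] ∨ ∃ s st', suf = s :: st' ∧ a < (pvGetN nds (s : Int)).sz) := by
  intro ch
  induction ch with
  | nil =>
    intro _
    exact ⟨([] : List Nat), ([] : List Nat), rfl, fun c hc => by simp at hc, rfl, trivial,
      Or.inl rfl⟩
  | cons c cs ih =>
    intro h
    by_cases hgt : a < (pvGetN nds (c : Int)).sz
    · refine ⟨([] : List Nat), c :: cs, rfl, fun c' hc' => by simp at hc', ?_, h,
        Or.inr ⟨c, cs, rfl, hgt⟩⟩
      simp [fgIdx, hgt, cIdx]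
    · obtain ⟨pre, suf, he, hpre, hfg, hok, hsuf⟩ := ih h.2.2.2.2.2
      refine ⟨c :: pre, suf, by simp [he], ?_, ?_, hok, hsuf⟩
      · intro c' hc'
        rcases List.mem_cons.mp hc' with h1 | h1
        · subst h1; omega
        · exact hpre c' h1
      · simp [fgIdx, hgt, hfg]

-- prefix of sizes ≤ a is transparent to fgIdx at level a
theorem fgIdx_skip (nds : List PvNode) (a : Int) :
    ∀ (pre suf : List Nat), (∀ c ∈ pre, (pvGetN nds (c : Int)).sz ≤ a) →
      fgIdx nds a (pre ++ suf) = fgIdx nds a suf := by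
  intro pre
  induction pre with
  | nil => intro suf _; rfl
  | cons c cs ih =>
    intro suf hp
    have h1 : ¬ a < (pvGetN nds (c : Int)).sz := by
      have := hp c (by simp); omega
    simp only [List.cons_append, fgIdx, if_neg h1]
    exact ih suf (fun c' hc' => hp c' (by simp [hc']))

-- Source B's jump walk computes fgIdx of the chain below (and including) the top
theorem pvJump_eq_fgIdx (nds : List PvNode) (a : Int) :
    ∀ fuel ch, ChainOK nds ch → ch.length < fuel →
      pvJump nds a fuel (cIdx ch) = fgIdx nds a ch := by
  intro fuel
  induction fuel with
  | zero => intro ch _ h; omega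
  | succ f ih =>
    intro ch hok hlen
    cases ch with
    | nil => simp [pvJump, cIdx, fgIdx]
    | cons c cs =>
      have hc0 : ¬ ((c : Int) < 0) := by omega
      by_cases hle : (pvGetN nds (c : Int)).sz ≤ a
      · have hgt : ¬ a < (pvGetN nds (c : Int)).sz := by omega
        simp only [pvJump, cIdx, if_neg hc0, if_pos hle]
        rw [hok.2.2.2.1]
        obtain ⟨pre, suf, he, hpre, hfg, hok', _⟩ :=
          fgIdx_split nds (pvGetN nds (c : Int)).sz cs hok.2.2.2.2.2
        rw [hfg]
        have hpre' : ∀ c' ∈ pre, (pvGetN nds (c' : Int)).sz ≤ a :=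
          fun c' hc' => le_trans (hpre c' hc') hle
        have hsl : suf.length < f := by
          have : (pre ++ suf).length = cs.length := by rw [he]
          simp only [List.length_append] at this
          simp only [List.length_cons] at hlen
          omega
        rw [ih suf hok' hsl, fgIdx, if_neg hgt, he, fgIdx_skip nds a pre suf hpre']
      · have hgt : a < (pvGetN nds (c : Int)).sz := by omega
        simp [pvJump, cIdx, fgIdx, hle, hgt]

-- A's inner while loop pops exactly the ≤-a non-shield prefix, then stops / appends
theorem solutionLoop_split (a b : Int) (zs : List (Int × Int))
    (hz : zs = [] ∨ ∃ z zt, zs = z :: zt ∧ z.2 = 0)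
    (suf : List (Int × Int))
    (hsuf : suf = [] ∨ ∃ s st', suf = s :: st' ∧ s.2 ≠ 0 ∧ a < s.1) :
    ∀ pre, (∀ p ∈ pre, p.2 ≠ 0 ∧ p.1 ≤ a) →
      solutionLoop a b (pre ++ suf ++ zs)
        = if suf = [] then (if zs = [] then [] else (a, b) :: zs)
          else suf ++ zs := by
  intro pre
  induction pre with
  | nil =>
    intro _
    rcases hsuf with hs | ⟨s, st', hs, hs0, hsgt⟩
    · subst hs
      rcases hz with hzz | ⟨z, zt, hzz, hz0⟩
      · subst hzz; simp [solutionLoop]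
      · subst hzz
        obtain ⟨z1, z2⟩ := z
        simp only at hz0
        subst hz0
        simp [solutionLoop]
    · subst hs
      obtain ⟨s1, s2⟩ := s
      simp only at hs0 hsgt
      simp [solutionLoop, hs0, hsgt]
  | cons p pt ih =>
    intro hp
    obtain ⟨p1, p2⟩ := p
    have h1 := hp (p1, p2) (by simp)
    have hp2 : p2 ≠ 0 := h1.1
    have hple : ¬ (p1 > a) := by have := h1.2; omega
    simp only [List.cons_append, List.append_assoc] at *
    rw [show solutionLoop a b ((p1, p2) :: (pt ++ (suf ++ zs)))
        = solutionLoop a b (pt ++ (suf ++ zs)) from by simp [solutionLoop, hp2, hple]]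
    exact ih (fun q hq => hp q (by simp [hq]))

theorem cIdx_neg (ch : List Nat) (h : cIdx ch < 0) : ch = [] := by
  cases ch with
  | nil => rfl
  | cons c cs => simp [cIdx] at h; omega

theorem step_inv (stk : List (Int × Int)) (st : Int × Int × List PvNode) (ab : Int × Int)
    (h : SInv stk st) : SInv (solutionStep stk ab) (altStep st ab) := by
  obtain ⟨frozen, top, nds⟩ := st
  obtain ⟨a, b⟩ := ab
  obtain ⟨ch, zs, hstk, hok, htop, hlen, hz⟩ := h
  simp only at hstk hok htop hlen hz
  by_cases hb : b = 0
  · subst hb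
    by_cases htneg : top < 0
    · -- stack top is the frozen shield (or empty): push (a,0), count it frozen
      have hch : ch = [] := cIdx_neg ch (htop ▸ htneg)
      subst hch
      simp only [nodesOf, List.map_nil, List.nil_append] at hstk
      have halt : altStep (frozen, top, nds) (a, 0) = (frozen + 1, top, nds) := by
        simp [altStep, htneg]
      rw [halt]
      refine ⟨[], (a, 0) :: zs, ?_, trivial, htop, by simp only [List.length_cons]; push_cast; omega,
        Or.inr ⟨(a, 0), zs, rfl, rfl⟩⟩
      rw [hstk]
      rcases hz with hzz | ⟨z, zt, hzz, hz0⟩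
      · subst hzz; simp [solutionStep, nodesOf]
      · subst hzz
        obtain ⟨z1, z2⟩ := z
        simp only at hz0
        subst hz0
        simp [solutionStep, nodesOf]
    · -- top ≥ 0: the chain is nonempty
      obtain ⟨c, cs, hch⟩ : ∃ c cs, ch = c :: cs := by
        cases ch with
        | nil => simp [cIdx] at htop; omega
        | cons c cs => exact ⟨c, cs, rfl⟩
      subst hch
      have htc : top = (c : Int) := htop
      have hfuel : (c :: cs).length < nds.length + 1 := by
        have h1 := hok.1
        have h2 := chainOK_len nds cs c hok
        simp only [List.length_cons]
        omega
      by_cases hfl : (pvGetN nds (c : Int)).fl = 1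
      · -- fight: Source B jumps pg links; A pops (or passes)
        have hne : ((pvGetN nds top).fl != 1) = false := by simp [htc, hfl]
        have halt : altStep (frozen, top, nds) (a, 0)
            = ((if pvJump nds a (nds.length + 1) top < 0 then frozen + 1 else frozen),
               pvJump nds a (nds.length + 1) top, nds) := by
          simp only [altStep]
          rw [if_pos (by simp), if_neg (by omega), hne]
          simp
        have hjump : pvJump nds a (nds.length + 1) top = fgIdx nds a (c :: cs) := by
          rw [htc]
          exact pvJump_eq_fgIdx nds a (nds.length + 1) (c :: cs) hok hfuel
        by_cases hgt : a < (pvGetN nds (c : Int)).sz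
        · -- `if size[-1] > A[i]: pass` — nothing changes on either side
          have hfg : fgIdx nds a (c :: cs) = (c : Int) := by simp [fgIdx, hgt]
          rw [halt, hjump, hfg, if_neg (by omega)]
          refine ⟨c :: cs, zs, ?_, hok, rfl, hlen, hz⟩
          rw [hstk]
          simp only [nodesOf, List.map_cons, List.cons_append, solutionStep, hfl,
            show (((1 : Int)) == 1 && ((0 : Int)) == 0) = true from by decide, if_true]
          rw [if_pos (by omega)]
        · -- pop: split cs at the first node bigger than a
          have hle : (pvGetN nds (c : Int)).sz ≤ a := by omega
          obtain ⟨pre, suf, he, hpre, hfg, hok', hsuf⟩ := fgIdx_split nds a cs hok.2.2.2.2.2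
          have hfg2 : fgIdx nds a (c :: cs) = cIdx suf := by
            simp [fgIdx, hgt, hfg]
          -- A's step runs the inner loop over (c :: pre) then suf then zs
          have hpre' : ∀ p ∈ nodesOf nds (c :: pre), p.2 ≠ 0 ∧ p.1 ≤ a := by
            intro p hp
            rcases List.mem_map.mp hp with ⟨c', hc', hpe⟩
            subst hpe
            rcases List.mem_cons.mp hc' with h1 | h1
            · subst h1; exact ⟨by simp [hfl], hle⟩
            · exact ⟨chainOK_fl nds cs hok.2.2.2.2.2 c' (he ▸ List.mem_append_left suf h1),
                hpre c' h1⟩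
          have hsuf' : nodesOf nds suf = [] ∨
              ∃ s st', nodesOf nds suf = s :: st' ∧ s.2 ≠ 0 ∧ a < s.1 := by
            rcases hsuf with h1 | ⟨s, st', h1, h2⟩
            · subst h1; exact Or.inl rfl
            · subst h1
              refine Or.inr ⟨_, _, rfl, ?_, h2⟩
              exact chainOK_fl nds (s :: st') hok' s (by simp)
          have hloop := solutionLoop_split a 0 zs hz (nodesOf nds suf) hsuf'
            (nodesOf nds (c :: pre)) hpre'
          have hstk2 : stk = nodesOf nds (c :: pre) ++ nodesOf nds suf ++ zs := by
            rw [hstk, he]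
            simp [nodesOf]
          have hcons : stk = ((pvGetN nds (c : Int)).sz, (pvGetN nds (c : Int)).fl) ::
              (nodesOf nds pre ++ (nodesOf nds suf ++ zs)) := by
            rw [hstk, he]
            simp [nodesOf, List.map_append, List.append_assoc]
          have hloop' : solutionLoop a 0 stk
              = if nodesOf nds suf = [] then (if zs = [] then [] else (a, 0) :: zs)
                else nodesOf nds suf ++ zs := by
            rw [hstk2]
            exact hloop
          have hstep : solutionStep stk (a, 0)
              = if suf = [] then (a, 0) :: zs else nodesOf nds suf ++ zs := by
            rw [hcons]
            simp only [solutionStep]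
            rw [if_pos (by simp [hfl]), if_neg (by omega), ← hcons, hloop']
            by_cases hse : suf = []
            · subst hse
              rcases hz with hzz | ⟨z, zt, hzz, _⟩ <;> subst hzz <;> simp [nodesOf]
            · have hns : nodesOf nds suf ≠ [] := by
                cases suf with
                | nil => exact absurd rfl hse
                | cons s st' => simp [nodesOf]
              rw [if_neg hns, if_neg hse]
              cases hq : nodesOf nds suf with
              | nil => exact absurd hq hns
              | cons q qs => simp
          rw [halt, hjump, hfg2, hstep]
          by_cases hse : suf = []
          · subst hse
            rw [if_pos rfl, if_pos (by simp [cIdx])]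
            exact ⟨[], (a, 0) :: zs, by simp [nodesOf], trivial, rfl,
              by simp only [List.length_cons]; push_cast; omega,
              Or.inr ⟨(a, 0), zs, rfl, rfl⟩⟩
          · obtain ⟨s, st', h1, _⟩ : ∃ s st', suf = s :: st' ∧ a < (pvGetN nds (s : Int)).sz := by
              rcases hsuf with h1 | h1
              · exact absurd h1 hse
              · exact h1
            rw [if_neg hse, if_neg (by subst h1; simp only [cIdx]; omega)]
            exact ⟨suf, zs, rfl, hok', rfl, hlen, hz⟩
      · -- no fight (top flow ≠ 1): A pushes the shield, Source B freezes the whole chain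
        have hne : ((pvGetN nds top).fl != 1) = true := by simp [htc, hfl]
        have halt : altStep (frozen, top, nds) (a, 0)
            = (frozen + (pvGetN nds top).dp + 1, -1, nds) := by
          simp only [altStep]
          rw [if_pos (by simp), if_neg (by omega), hne]
          simp
        rw [halt]
        refine ⟨[], (a, 0) :: nodesOf nds (c :: cs) ++ zs, ?_, trivial, rfl, ?_,
          Or.inr ⟨(a, 0), nodesOf nds (c :: cs) ++ zs, rfl, rfl⟩⟩
        · rw [hstk]
          simp only [nodesOf, List.map_cons, List.cons_append, solutionStep]
          rw [if_neg (by simp [hfl])]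
          simp
        · have hdp := hok.2.2.2.2.1
          rw [htc, hdp]
          simp only [List.length_cons, List.length_append, nodesOf, List.length_map]
          push_cast
          omega
  · -- b != 0: both sides append the fish on top
    have hb' : ((b : Int) == 0) = false := by simp [hb]
    have hbounds := chainOK_bound nds ch hok
    have halt : altStep (frozen, top, nds) (a, b)
        = (frozen, (nds.length : Int),
           nds ++ [⟨a, b, (if top ≥ 0 then (pvGetN nds top).dp + 1 else 1),
                    pvJump nds a (nds.length + 1) top⟩]) := by
      simp [altStep, hb']
    rw [halt]
    set x : PvNode := ⟨a, b, (if top ≥ 0 then (pvGetN nds top).dp + 1 else 1),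
      pvJump nds a (nds.length + 1) top⟩ with hx
    have hfuel : ch.length < nds.length + 1 := by
      cases ch with
      | nil => simp
      | cons c cs =>
        have h1 := hok.1
        have h2 := chainOK_len nds cs c hok
        simp only [List.length_cons]
        omega
    have hjump : pvJump nds a (nds.length + 1) top = fgIdx nds a ch := by
      rw [htop]; exact pvJump_eq_fgIdx nds a (nds.length + 1) ch hok hfuel
    have hdp : (if top ≥ 0 then (pvGetN nds top).dp + 1 else 1) = (ch.length : Int) + 1 := by
      cases ch with
      | nil =>
        have : top = -1 := htop
        rw [if_neg (by omega)]
        simp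
      | cons c cs =>
        have htc : top = (c : Int) := htop
        rw [if_pos (by rw [htc]; omega), htc, hok.2.2.2.2.1]
        simp
    have hstep : solutionStep stk (a, b) = (a, b) :: stk := by
      rw [hstk]
      cases hq : nodesOf nds ch ++ zs with
      | nil => simp [solutionStep]
      | cons q qs =>
        have hq2 : ¬ (q.2 == 1 && ((b : Int)) == 0) = true := by simp [hb]
        obtain ⟨q1, q2⟩ := q
        simp only [solutionStep]
        simp only at hq2
        rw [if_neg hq2]
    have h2 : nodesOf (nds ++ [x]) (nds.length :: ch) = (a, b) :: nodesOf nds ch := by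
      have e1 : nodesOf (nds ++ [x]) (nds.length :: ch)
          = ((pvGetN (nds ++ [x]) ((nds.length : Nat) : Int)).sz,
             (pvGetN (nds ++ [x]) ((nds.length : Nat) : Int)).fl) ::
            nodesOf (nds ++ [x]) ch := rfl
      rw [e1, pvGetN_append_last nds x, nodesOf_append nds x ch hbounds]
    refine ⟨nds.length :: ch, zs, ?_, ?_, by simp [cIdx], hlen, hz⟩
    · rw [hstep, hstk, h2]
      simp
    · refine ⟨by simp only [List.length_append, List.length_cons]; omega,
        fun c' hc' => by have := hbounds c' hc'; omega,
        ?_, ?_, ?_, chainOK_append nds x ch hok⟩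
      · rw [pvGetN_append_last nds x]
        show b ≠ 0
        exact hb
      · rw [pvGetN_append_last nds x]
        show pvJump nds a (nds.length + 1) top = fgIdx (nds ++ [x]) a ch
        rw [hjump, fgIdx_append nds x a ch hbounds]
      · rw [pvGetN_append_last nds x]
        show (if top ≥ 0 then (pvGetN nds top).dp + 1 else 1) = (ch.length : Int) + 1
        exact hdp

theorem foldl_inv : ∀ (l : List (Int × Int)) (stk : List (Int × Int))
    (st : Int × Int × List PvNode), SInv stk st →
    SInv (l.foldl (fun stk ab => solutionStep stk ab) stk) (l.foldl altStep st) := by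
  intro l
  induction l with
  | nil => intro stk st h; simpa using h
  | cons ab l' ih =>
    intro stk st h
    simp only [List.foldl_cons]
    exact ih _ _ (step_inv stk st ab h)

-- ===== VERDICT (by name: the statement is the Claim_ definition above) =====
theorem solution_spec : Claim_equal_solution := by
  intro A B _ hlen
  unfold Spec_solution
  rw [solution_eq_zip A B hlen]
  have h := foldl_inv (A.zip B) [] (0, -1, [])
    ⟨[], [], by simp [nodesOf], trivial, rfl, by simp, Or.inl rfl⟩
  obtain ⟨ch, zs, hstk, hok, htop, hcnt, _⟩ := h
  unfold solution_alt
  rw [hstk]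
  simp only [List.length_append, nodesOf, List.length_map]
  cases ch with
  | nil =>
    have hm1 : ((A.zip B).foldl altStep (0, -1, [])).2.1 = -1 := htop
    rw [hm1, if_neg (by omega), ← hcnt]
    simp
  | cons c cs =>
    have htc : ((A.zip B).foldl altStep (0, -1, [])).2.1 = (c : Int) := htop
    rw [htc, if_pos (by omega), ← htc]
    rw [htc, hok.2.2.2.2.1, ← hcnt]
    simp only [List.length_cons]
    push_cast
    ring
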